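-- pv_equiv track=rewrite | github.com/pypi-data/pypi-mirror-400 | packages/magnopy/magnopy-0.4.3-py3-none-any.whl/magnopy/io/_vampire.py | _verified_materials
-- ===== SOURCE A (Python) =====
-- def _verified_materials(materials, M):
--     if materials is None:
--         materials = [i for i in range(M)]
--     else:
--         if len(materials) != M:
--             raise ValueError(f"Expected {M} materials, got {len(materials)}.")
--         materials_pool = set(materials)
--         higher_material = max(materials_pool)
--         for i in range(0, higher_material + 1):
--             if i not in materials_pool:
--                 raise ValueError(
--                     f"Materials indices should be consecutive integers between 0 and {higher_material}. Missing {i}."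
--                 )
--
--     return materials
-- ===== SOURCE B (Python) =====
-- def _verified_materials(materials, M):
--     if materials is None:
--         return list(range(M))
--     if len(materials) != M:
--         raise ValueError(f"Expected {M} materials, got {len(materials)}.")
--     distinct = sorted(set(materials))
--     higher_material = distinct[-1]
--     expected = 0
--     for x in distinct:
--         if x < 0:
--             continue
--         if x != expected:
--             raise ValueError(
--                 f"Materials indices should be consecutive integers between 0 and {higher_material}. Missing {expected}."
--             )
--         expected += 1
--     return materials
-- ===== Notes on version B (the rewrite author's own statement) =====
-- stated objective: alternative
-- what changed: Instead of testing membership of every i in range(0, max+1) against a hash set, B sorts the distinct values once and makes a single linear scan of the sorted list with an 'expected' counter, skipping negatives; the first value that breaks the consecutive run is the smallest missing index.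
import Mathlib
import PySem

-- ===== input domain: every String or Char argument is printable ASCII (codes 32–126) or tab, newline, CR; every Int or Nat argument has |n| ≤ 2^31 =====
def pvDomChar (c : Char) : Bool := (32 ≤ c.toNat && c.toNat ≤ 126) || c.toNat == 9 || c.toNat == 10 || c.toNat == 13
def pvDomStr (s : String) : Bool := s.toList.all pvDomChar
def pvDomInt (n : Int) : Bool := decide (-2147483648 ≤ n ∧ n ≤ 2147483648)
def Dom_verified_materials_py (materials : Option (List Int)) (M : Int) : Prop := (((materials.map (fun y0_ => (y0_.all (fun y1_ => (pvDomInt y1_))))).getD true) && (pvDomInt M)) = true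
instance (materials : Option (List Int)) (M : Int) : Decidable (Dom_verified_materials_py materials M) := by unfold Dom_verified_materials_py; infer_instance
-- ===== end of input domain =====

-- B replaces A's membership test of every i in range(0, max+1) against a set by a
-- sort of the distinct values followed by one linear scan with an 'expected' counter
-- (alternative decomposition; return-value equivalence on Pre_).

-- ===== PORT A =====
-- A's raises (length mismatch, max() of an empty set, a missing index found by the
-- scan) return [] in the port; Pre_ excludes exactly those inputs.
def verified_materials_py (materials : Option (List Int)) (M : Int) : List Int :=
  match materials with
  | none => PySem.List.pyRange 0 M 1
  | some l =>
    if (l.length : Int) ≠ M then []  -- raise ValueError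
    else
      let pool : PySem.Set Int := PySem.Set.ofList l
      match PySem.List.max? pool (fun x => x) with
      | none => []  -- max() of empty set raises ValueError
      | some higher =>
        -- the ordered scan: raise at the first i in range(0, higher+1) not in pool
        if (PySem.List.pyRange 0 (higher + 1) 1).all (fun i => PySem.Set.contains pool i)
        then l
        else []  -- raise ValueError

-- ===== PORT B =====
-- B's scan over the sorted distinct values: 'continue' on negatives, first value that
-- is not the expected one is the smallest missing index (some = raise ValueError).
def pvScanB : Int → List Int → Option Int
  | _, [] => none
  | e, x :: t => if x < 0 then pvScanB e t else if x ≠ e then some e else pvScanB (e + 1) t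

def verified_materials_py_alt (materials : Option (List Int)) (M : Int) : List Int :=
  match materials with
  | none => PySem.List.pyRange 0 M 1
  | some l =>
    if (l.length : Int) ≠ M then []  -- raise ValueError
    else
      let distinct := PySem.List.sorted (PySem.Set.ofList l) (fun x => x) false
      match distinct.getLast? with  -- distinct[-1]; raises IndexError on empty list
      | none => []
      | some _higher =>
        match pvScanB 0 distinct with
        | some _ => []  -- raise ValueError
        | none => l

-- ===== PRECONDITION & SPEC =====
-- max of a nonempty list, as Python's running-max loop
def pvMaxOf : List Int → Int
  | [] => 0
  | x :: t => t.foldl max x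

-- Pre_ excludes exactly the inputs where A raises: a materials list whose length
-- differs from M, the empty list (max() of an empty set raises), and a list missing
-- some index between 0 and its maximum.
def Pre_verified_materials_py (materials : Option (List Int)) (M : Int) : Prop :=
  materials = none ∨
    ((((materials.getD []).length : Int) = M ∧ materials.getD [] ≠ []) ∧
      ∀ i ∈ PySem.List.pyRange 0 (pvMaxOf (materials.getD []) + 1) 1, i ∈ materials.getD [])
instance (materials : Option (List Int)) (M : Int) : Decidable (Pre_verified_materials_py materials M) := by unfold Pre_verified_materials_py; infer_instance

def pvWitness_verified_materials_py : Option (List Int) × Int := (some [2, 0, 1], 3)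

def Spec_verified_materials_py (materials : Option (List Int)) (M : Int) (out : List Int) : Prop := out = verified_materials_py_alt materials M
instance (materials : Option (List Int)) (M : Int) (out : List Int) : Decidable (Spec_verified_materials_py materials M out) := by unfold Spec_verified_materials_py; infer_instance

-- ===== CLAIM (what is proved, stated in full; the proofs are below) =====
def Claim_equal_verified_materials_py : Prop := ∀ (materials : Option (List Int)) (M : Int), Dom_verified_materials_py materials M → Pre_verified_materials_py materials M → Spec_verified_materials_py materials M (verified_materials_py materials M)

-- ===== LEMMAS AND PROOFS =====

lemma pvMaxOf_mem (l : List Int) (h : l ≠ []) : pvMaxOf l ∈ l := by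
  match l with
  | x :: t =>
    rcases PySem.List.foldl_max_mem t x with h1 | h1
    · simp [pvMaxOf, h1]
    · exact List.mem_cons_of_mem x h1

lemma le_pvMaxOf (l : List Int) (x : Int) (h : x ∈ l) : x ≤ pvMaxOf l := by
  match l with
  | y :: t =>
    rcases List.mem_cons.mp h with rfl | hx
    · exact (PySem.List.le_foldl_max t x).1
    · exact (PySem.List.le_foldl_max t y).2 x hx

lemma max?_ofList_eq (l : List Int) (h : l ≠ []) :
    PySem.List.max? (PySem.Set.ofList l) (fun x => x) = some (pvMaxOf l) := by
  have hs : PySem.Set.ofList l ≠ [] := by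
    match l with
    | x :: t =>
      intro he
      have : x ∈ PySem.Set.ofList (x :: t) := (PySem.Set.mem_ofList _ _).mpr (List.mem_cons_self)
      simp [he] at this
  obtain ⟨m, hm⟩ : ∃ m, PySem.List.max? (PySem.Set.ofList l) (fun x => x) = some m := by
    cases hq : PySem.List.max? (PySem.Set.ofList l) (fun x => x) with
    | none => exact absurd ((PySem.List.max?_eq_none_iff ..).mp hq) hs
    | some m => exact ⟨m, rfl⟩
  have hmem : m ∈ l := (PySem.Set.mem_ofList _ _).mp (PySem.List.max?_mem hm)
  have h1 : m ≤ pvMaxOf l := le_pvMaxOf l m hmem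
  have h2 : pvMaxOf l ≤ m :=
    PySem.List.max?_isMax hm (pvMaxOf l) ((PySem.Set.mem_ofList _ _).mpr (pvMaxOf_mem l h))
  rw [hm, le_antisymm h1 h2]

-- The heart of B's correctness on Pre_: scanning a strictly increasing list whose
-- elements are ≤ hi and which contains every integer in [e, hi], all of whose
-- elements are negative or ≥ e, never finds a mismatch.
lemma pvScanB_none (hi : Int) (d : List Int) (e : Int) (he : 0 ≤ e)
    (hp : d.Pairwise (· < ·)) (hb : ∀ x ∈ d, x ≤ hi)
    (hc : ∀ i : Int, e ≤ i → i ≤ hi → i ∈ d)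
    (hl : ∀ x ∈ d, x < 0 ∨ e ≤ x) : pvScanB e d = none := by
  induction d generalizing e with
  | nil => rfl
  | cons x t ih =>
    have hpt := (List.pairwise_cons.mp hp).2
    have hxlt := (List.pairwise_cons.mp hp).1
    by_cases hneg : x < 0
    · have : pvScanB e t = none := by
        refine ih e he hpt (fun y hy => hb y (List.mem_cons_of_mem x hy)) ?_
          (fun y hy => hl y (List.mem_cons_of_mem x hy))
        intro i hi1 hi2
        rcases List.mem_cons.mp (hc i hi1 hi2) with rfl | h
        · omega
        · exact h
      simpa [pvScanB, hneg] using this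
    · have hex : e ≤ x := by
        rcases hl x List.mem_cons_self with h | h
        · omega
        · exact h
      have hehi : e ≤ hi := le_trans hex (hb x List.mem_cons_self)
      have hxe : x = e := by
        rcases List.mem_cons.mp (hc e le_rfl hehi) with h | h
        · omega
        · have := hxlt e h; omega
      subst hxe
      have : pvScanB (x + 1) t = none := by
        refine ih (x + 1) (by omega) hpt (fun y hy => hb y (List.mem_cons_of_mem x hy)) ?_ ?_
        · intro i hi1 hi2
          rcases List.mem_cons.mp (hc i (by omega) hi2) with rfl | h
          · omega
          · exact h
        · intro y hy
          have := hxlt y hy; omega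
      simpa [pvScanB, hneg] using this

-- ===== VERDICT (by name: the statement is the Claim_ definition above) =====
theorem verified_materials_py_spec : Claim_equal_verified_materials_py := by
  intro materials M _ hpre
  unfold Spec_verified_materials_py
  match materials with
  | none => rfl
  | some l =>
    rcases hpre with h | ⟨⟨hlen, hne⟩, hall⟩
    · exact absurd h (by simp)
    simp only [Option.getD] at hlen hne hall
    have hA : (PySem.List.pyRange 0 (pvMaxOf l + 1) 1).all
        (fun i => PySem.Set.contains (PySem.Set.ofList l) i) = true := by
      rw [List.all_eq_true]
      intro i hi
      exact (PySem.Set.contains_iff ..).mpr ((PySem.Set.mem_ofList _ _).mpr (hall i hi))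
    have hdne : PySem.List.sorted (PySem.Set.ofList l) (fun x => x) false ≠ [] := by
      intro h
      have h2 : PySem.Set.ofList l = [] := (PySem.List.sorted_eq_nil_iff ..).mp h
      match l with
      | x :: t =>
        have : x ∈ PySem.Set.ofList (x :: t) := (PySem.Set.mem_ofList _ _).mpr List.mem_cons_self
        simp [h2] at this
    obtain ⟨z, hz⟩ := List.getLast?_isSome.mpr hdne |> Option.isSome_iff_exists.mp
    have hmemd : ∀ x : Int, x ∈ PySem.List.sorted (PySem.Set.ofList l) (fun x => x) false ↔ x ∈ l := by
      intro x
      rw [PySem.List.mem_sorted, PySem.Set.mem_ofList]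
    have hscan : pvScanB 0 (PySem.List.sorted (PySem.Set.ofList l) (fun x => x) false) = none := by
      refine pvScanB_none (pvMaxOf l) _ 0 le_rfl (PySem.List.sorted_ofList_pairwise_lt l) ?_ ?_ ?_
      · intro x hx; exact le_pvMaxOf l x ((hmemd x).mp hx)
      · intro i h0 h1
        exact (hmemd i).mpr (hall i ((PySem.List.mem_pyRange_one ..).mpr (by omega)))
      · intro x _; omega
    simp only [verified_materials_py, verified_materials_py_alt, hlen,
      max?_ofList_eq l hne, ne_eq, not_true_eq_false, if_false, hA, if_true, hz, hscan]
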